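-- pv_equiv track=rewrite | github.com/mistrjirka/WE-SHALL-PASS-ACM | Pokročila algoritmizace/Minesweeper/mineSweeper.py | look_for_mines
-- ===== SOURCE A (Python) =====
-- def check_out_of_bounce(ivRow, ivCol, ivData):  # returns True if the point is out of bounce.
--     if ivRow < 0 or ivCol < 0:  # Check row and column >0
--         return True
--     if ivCol >= len(ivData):  # Check column max out of bounce
--         return True
--     if ivRow >= len(ivData[ivCol]):  # Check row max out of bounce
--         return True
--     return False
--
-- def search_directions(ivRow, ivCol, ivData):
--     lvMineCount = 0
--     for dirY in range(-1, 2):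
--         for dirX in range(-1, 2):
--             if dirX != 0 or dirY != 0:
--                 if check_out_of_bounce(dirX + ivRow, dirY + ivCol, ivData):
--                     continue
--                 elif ivData[dirY + ivCol][dirX + ivRow] == '*':
--                     lvMineCount += 1
--     return lvMineCount.__str__()
--
-- def look_for_mines(ivCol, ivData):
--     lvMineString = ""
--     for lvRowIndex in range(0, len(ivData[ivCol])):
--         if ivData[ivCol][lvRowIndex] == '*':
--             lvMineString += '*'
--         else:
--             lvMineString += search_directions(lvRowIndex, ivCol, ivData)
--     return lvMineString
-- ===== SOURCE B (Python) =====
-- def look_for_mines(ivCol, ivData):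
--     row = ivData[ivCol]
--     m = len(row)
--     counts = [0] * m
--     for c in range(ivCol - 1, ivCol + 2):
--         if 0 <= c < len(ivData):
--             neighbour = ivData[c]
--             for j in range(len(neighbour)):
--                 if neighbour[j] == '*':
--                     for k in range(max(0, j - 1), min(m, j + 2)):
--                         counts[k] += 1
--     return ''.join('*' if ch == '*' else str(cnt) for ch, cnt in zip(row, counts))
-- ===== Notes on version B (the rewrite author's own statement) =====
-- stated objective: alternative
-- what changed: B inverts A's per-cell gather (9 bounds-checked neighbour lookups for each cell) into a scatter/contribution pass: it allocates a counts array for the row, iterates once over the mines of the up-to-three in-range grid rows scattering +1 into the clamped neighbour window of each mine, and finally renders the row from the precomputed counts.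
import Mathlib
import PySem

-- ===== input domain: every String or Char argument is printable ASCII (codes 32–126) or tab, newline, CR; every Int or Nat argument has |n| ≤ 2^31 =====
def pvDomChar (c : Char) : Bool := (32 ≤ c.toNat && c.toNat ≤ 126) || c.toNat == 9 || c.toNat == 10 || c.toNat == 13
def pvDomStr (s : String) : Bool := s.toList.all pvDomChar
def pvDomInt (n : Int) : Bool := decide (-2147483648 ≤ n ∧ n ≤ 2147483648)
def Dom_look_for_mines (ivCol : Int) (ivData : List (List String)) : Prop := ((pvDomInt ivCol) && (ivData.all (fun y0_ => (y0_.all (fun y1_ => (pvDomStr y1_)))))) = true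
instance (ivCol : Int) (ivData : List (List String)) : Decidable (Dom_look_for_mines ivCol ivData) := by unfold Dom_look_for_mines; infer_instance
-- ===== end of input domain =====

-- B inverts A's per-cell gather of nine bounds-checked neighbour lookups into a scatter pass:
-- it allocates a counts array for the row, scatters +1 from each mine of the up-to-three
-- in-range grid rows into the mine's clamped neighbour window, and renders from the counts.
-- Equivalence of the RETURN value is proved on Pre_ (ivCol a valid Python index into ivData).

-- ===== PORT A =====
def check_out_of_bounce (ivRow : Int) (ivCol : Int) (ivData : List (List String)) : Bool :=
  if ivRow < 0 || ivCol < 0 then true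
  else if (ivData.length : Int) ≤ ivCol then true
  -- ivData[ivCol] is guarded by the two tests above, so pyGetD is exact here
  else if ((PySem.List.pyGetD ivData ivCol []).length : Int) ≤ ivRow then true
  else false

def search_directions (ivRow : Int) (ivCol : Int) (ivData : List (List String)) : String :=
  PySem.Int.toStr ((PySem.List.pyRange (-1) 2 1).foldl (fun acc dirY =>
    (PySem.List.pyRange (-1) 2 1).foldl (fun acc2 dirX =>
      if dirX ≠ 0 ∨ dirY ≠ 0 then
        if check_out_of_bounce (dirX + ivRow) (dirY + ivCol) ivData then acc2
        -- this lookup is guarded by check_out_of_bounce = false, so pyGetD is exact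
        else if PySem.List.pyGetD (PySem.List.pyGetD ivData (dirY + ivCol) []) (dirX + ivRow) "" == "*" then acc2 + 1
        else acc2
      else acc2) acc) 0)

def look_for_mines (ivCol : Int) (ivData : List (List String)) : String :=
  -- ivData[ivCol]: exact under Pre_ (Raise.InRange), where Python does not raise
  (PySem.List.pyRange 0 ((PySem.List.pyGetD ivData ivCol []).length : Int) 1).foldl
    (fun s i =>
      if PySem.List.pyGetD (PySem.List.pyGetD ivData ivCol []) i "" == "*" then s ++ "*"
      else s ++ search_directions i ivCol ivData) ""

-- ===== PORT B =====
def look_for_mines_alt (ivCol : Int) (ivData : List (List String)) : String :=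
  let row := PySem.List.pyGetD ivData ivCol []   -- ivData[ivCol], exact under Pre_
  let m : Int := (row.length : Int)
  -- counts = [0] * m, then the scatter loops (each counts[k] += 1 is in range 0 ≤ k < m, exact)
  let counts := (PySem.List.pyRange (ivCol - 1) (ivCol + 2) 1).foldl (fun cs c =>
    if 0 ≤ c ∧ c < (ivData.length : Int) then
      (PySem.List.pyRange 0 ((PySem.List.pyGetD ivData c []).length : Int) 1).foldl (fun cs2 j =>
        if PySem.List.pyGetD (PySem.List.pyGetD ivData c []) j "" == "*" then
          (PySem.List.pyRange (max 0 (j - 1)) (min m (j + 2)) 1).foldl (fun cs3 k =>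
            PySem.List.pySetD cs3 k (PySem.List.pyGetD cs3 k 0 + 1)) cs2
        else cs2) cs
    else cs) (List.replicate row.length 0)
  PySem.Str.join "" ((row.zip counts).map (fun p => if p.1 == "*" then "*" else PySem.Int.toStr p.2))

-- ===== PRECONDITION & SPEC =====
-- Pre_ excludes exactly the inputs where A raises IndexError on ivData[ivCol]
-- (ivCol outside the Python index range of ivData); B raises there as well.
def Pre_look_for_mines (ivCol : Int) (ivData : List (List String)) : Prop :=
  PySem.Raise.InRange ivData.length ivCol
instance (ivCol : Int) (ivData : List (List String)) : Decidable (Pre_look_for_mines ivCol ivData) := by unfold Pre_look_for_mines; infer_instance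

def pvWitness_look_for_mines : Int × List (List String) := (0, [["*", "."], [".", "."]])

def Spec_look_for_mines (ivCol : Int) (ivData : List (List String)) (out : String) : Prop := out = look_for_mines_alt ivCol ivData
instance (ivCol : Int) (ivData : List (List String)) (out : String) : Decidable (Spec_look_for_mines ivCol ivData out) := by unfold Spec_look_for_mines; infer_instance

-- ===== CLAIM (what is proved, stated in full; the proofs are below) =====
def Claim_equal_look_for_mines : Prop := ∀ (ivCol : Int) (ivData : List (List String)), Dom_look_for_mines ivCol ivData → Pre_look_for_mines ivCol ivData → Spec_look_for_mines ivCol ivData (look_for_mines ivCol ivData)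

-- ===== LEMMAS AND PROOFS =====

-- 0/1 indicator: row r has a mine at (valid) position t
def pvInd (r : List String) (t : Nat) : Int := if r[t]? = some "*" then 1 else 0

-- the neighbour-mine count cell i receives from row r (window {i-1, i, i+1} clipped at 0)
def pvCnt (r : List String) (i : Nat) : Int :=
  (if 1 ≤ i then pvInd r (i - 1) else 0) + pvInd r i + pvInd r (i + 1)

-- the contribution of one neighbour cell (column c, row index x) in A's scan
def pvTerm (ivData : List (List String)) (c : Int) (x : Int) : Int :=
  if check_out_of_bounce x c ivData then 0
  else if PySem.List.pyGetD (PySem.List.pyGetD ivData c []) x "" == "*" then 1 else 0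

-- the total contribution of grid row c to cell i (0 if c is out of range)
def pvCol (ivData : List (List String)) (c : Int) (i : Nat) : Int :=
  if 0 ≤ c ∧ c < (ivData.length : Int) then pvCnt (PySem.List.pyGetD ivData c []) i else 0

theorem pvTerm_out (ivData : List (List String)) (c x : Int)
    (h : ¬ (0 ≤ c ∧ c < (ivData.length : Int))) : pvTerm ivData c x = 0 := by
  unfold pvTerm check_out_of_bounce
  split_ifs with h1 h2 h3 <;> simp_all

theorem pvTerm_neg (ivData : List (List String)) (c x : Int) (hx : x < 0) :
    pvTerm ivData c x = 0 := by
  unfold pvTerm check_out_of_bounce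
  split_ifs with h1 h2 h3 <;> simp_all

theorem pvTerm_nat (ivData : List (List String)) (c : Int) (t : Nat)
    (hc : 0 ≤ c) (hn : c < (ivData.length : Int)) :
    pvTerm ivData c (t : Int) = pvInd (PySem.List.pyGetD ivData c []) t := by
  unfold pvTerm check_out_of_bounce pvInd
  by_cases ht : t < (PySem.List.pyGetD ivData c []).length
  · simp [not_lt.mpr hc, List.getElem?_eq_getElem ht, List.getD,
      Int.not_lt.mpr (Int.natCast_nonneg t), not_le.mpr hn,
      not_le.mpr (show (t:Int) < ((PySem.List.pyGetD ivData c []).length : Int) by exact_mod_cast ht)]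
  · have ht' : ((PySem.List.pyGetD ivData c []).length : Int) ≤ (t : Int) := by
      exact_mod_cast Nat.le_of_not_lt ht
    simp [not_lt.mpr hc, Int.not_lt.mpr (Int.natCast_nonneg t), not_le.mpr hn, ht',
      List.getElem?_eq_none (Nat.le_of_not_lt ht)]

-- A's three pvTerm's from grid row c at cell i collapse to pvCol
theorem pvCol_eq (ivData : List (List String)) (c : Int) (i : Nat) :
    pvTerm ivData c ((i : Int) - 1) + pvTerm ivData c (i : Int) + pvTerm ivData c ((i : Int) + 1)
      = pvCol ivData c i := by
  by_cases h : 0 ≤ c ∧ c < (ivData.length : Int)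
  · unfold pvCol pvCnt
    rw [if_pos h]
    cases i with
    | zero =>
      have h1 : pvTerm ivData c ((0 : Nat) - 1 : Int) = 0 := pvTerm_neg _ _ _ (by omega)
      have h2 : pvTerm ivData c ((0 : Nat) : Int) = pvInd (PySem.List.pyGetD ivData c []) 0 :=
        pvTerm_nat _ _ _ h.1 h.2
      have h3 : pvTerm ivData c (((0 : Nat) : Int) + 1) = pvInd (PySem.List.pyGetD ivData c []) 1 := by
        have := pvTerm_nat ivData c 1 h.1 h.2
        simpa using this
      rw [h1, h2, h3]
      norm_num
    | succ j =>
      have e1 : (((j+1 : Nat) : Int) - 1) = ((j : Nat) : Int) := by push_cast; ring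
      have e2 : (((j+1 : Nat) : Int) + 1) = ((j+2 : Nat) : Int) := by push_cast; ring
      have h1 := pvTerm_nat ivData c j h.1 h.2
      have h2 := pvTerm_nat ivData c (j+1) h.1 h.2
      have h3 := pvTerm_nat ivData c (j+2) h.1 h.2
      rw [e1, h1, h2, e2, h3]
      simp
  · rw [pvTerm_out _ _ _ h, pvTerm_out _ _ _ h, pvTerm_out _ _ _ h]
    unfold pvCol
    rw [if_neg h]
    norm_num

theorem pvTerm_center (ivCol : Int) (ivData : List (List String)) (x : Int)
    (hcell : ¬ (PySem.List.pyGetD (PySem.List.pyGetD ivData ivCol []) x "" == "*") = true) :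
    pvTerm ivData ivCol x = 0 := by
  unfold pvTerm
  split_ifs <;> simp_all

theorem pvStep_eq (acc : Int) (P Q R : Prop) [Decidable P] [Decidable Q] [Decidable R] :
    (if P then (if Q then acc else if R then acc + 1 else acc) else acc)
    = acc + (if P then (if Q then 0 else if R then 1 else 0) else 0) := by
  split_ifs <;> omega

theorem inner_eq (ivCol : Int) (ivData : List (List String)) (dirY : Int) (ivRow : Int) (acc : Int) :
    ((PySem.List.pyRange (-1) 2 1).foldl (fun acc2 dirX =>
      if dirX ≠ 0 ∨ dirY ≠ 0 then
        if check_out_of_bounce (dirX + ivRow) (dirY + ivCol) ivData then acc2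
        else if PySem.List.pyGetD (PySem.List.pyGetD ivData (dirY + ivCol) []) (dirX + ivRow) "" == "*" then acc2 + 1
        else acc2
      else acc2) acc)
    = acc + pvTerm ivData (dirY + ivCol) (-1 + ivRow)
        + (if dirY ≠ 0 then pvTerm ivData (dirY + ivCol) (0 + ivRow) else 0)
        + pvTerm ivData (dirY + ivCol) (1 + ivRow) := by
  rw [show PySem.List.pyRange (-1) 2 1 = [-1, 0, 1] from by decide]
  simp only [List.foldl]
  simp only [pvStep_eq]
  unfold pvTerm
  norm_num

-- A's digit at a non-mine cell i is the sum of the three pvCol contributions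
theorem countA_eq (ivCol : Int) (ivData : List (List String)) (i : Nat)
    (hcell : ¬ (PySem.List.pyGetD (PySem.List.pyGetD ivData ivCol []) ((i : Nat) : Int) "" == "*") = true) :
    search_directions ((i : Nat) : Int) ivCol ivData
      = PySem.Int.toStr (pvCol ivData (ivCol - 1) i + pvCol ivData ivCol i + pvCol ivData (ivCol + 1) i) := by
  unfold search_directions
  apply congrArg
  simp only [inner_eq]
  rw [show PySem.List.pyRange (-1) 2 1 = [-1, 0, 1] from by decide]
  simp only [List.foldl]
  norm_num
  have c1 := pvCol_eq ivData (ivCol - 1) i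
  have c2 := pvCol_eq ivData ivCol i
  have c3 := pvCol_eq ivData (ivCol + 1) i
  have h0 := pvTerm_center ivCol ivData ((i : Nat) : Int) hcell
  ring_nf at c1 c2 c3 h0 ⊢
  linarith [c1, c2, c3, h0]

theorem join_empty_cons (a : String) (l : List String) :
    PySem.Str.join "" (a :: l) = a ++ PySem.Str.join "" l := by
  apply String.toList_inj.mp
  rw [String.toList_append, PySem.Str.toList_join, PySem.Str.toList_join]
  cases l with
  | nil => simp [PySem.Chars.join_singleton, PySem.Chars.join_nil]
  | cons b rest =>
    simp only [List.map_cons]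
    rw [PySem.Chars.join_cons_cons]
    simp

theorem foldl_append_join (f : Int → String) (l : List Int) (s : String) :
    l.foldl (fun acc i => acc ++ f i) s = s ++ PySem.Str.join "" (l.map f) := by
  induction l generalizing s with
  | nil =>
    have : PySem.Str.join "" ([] : List String) = "" := by
      apply String.toList_inj.mp
      rw [PySem.Str.toList_join]
      simp [PySem.Chars.join_nil]
    simp [this]
  | cons a l ih =>
    simp only [List.foldl, List.map_cons]
    rw [ih, join_empty_cons, ← String.append_assoc]

-- ---- B-side: the scatter pass ----

theorem length_bump_fold (l : List Int) (cs : List Int) :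
    (l.foldl (fun cs3 k => PySem.List.pySetD cs3 k (PySem.List.pyGetD cs3 k 0 + 1)) cs).length = cs.length := by
  induction l generalizing cs with
  | nil => rfl
  | cons k t ih => simp only [List.foldl]; rw [ih, PySem.List.length_pySetD]

theorem get_bump_fold (l : List Int) (i : Nat) : ∀ (cs : List Int),
    (∀ k ∈ l, 0 ≤ k ∧ k < (cs.length : Int)) →
    PySem.List.pyGetD (l.foldl (fun cs3 k => PySem.List.pySetD cs3 k (PySem.List.pyGetD cs3 k 0 + 1)) cs) (i : Int) 0
      = PySem.List.pyGetD cs (i : Int) 0 + (l.count (i : Int) : Int) := by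
  induction l with
  | nil => intro cs h; simp
  | cons k t ih =>
    intro cs h
    have hk := h k (by simp)
    simp only [List.foldl, List.count_cons]
    rw [ih _ (fun k' hk' => by
      simpa [PySem.List.length_pySetD] using h k' (List.mem_cons_of_mem _ hk'))]
    have hklt : k.toNat < cs.length := by omega
    have hget : PySem.List.pyGetD (PySem.List.pySetD cs k (PySem.List.pyGetD cs k 0 + 1)) (i:Int) 0
        = PySem.List.pyGetD cs (i:Int) 0 + (if k == (i:Int) then 1 else 0) := by
      by_cases hki : k = (i:Int)
      · have hilt : i < cs.length := by omega
        rw [hki, PySem.List.pySetD_of_nonneg _ _ (by omega : (0:Int) ≤ (i:Int))]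
        simp [PySem.List.pyGetD_natCast, List.getD_eq_getElem?_getD, hilt]
      · have hne : k.toNat ≠ i := by omega
        rw [PySem.List.pySetD_of_nonneg _ _ hk.1, PySem.List.pyGetD_natCast,
          PySem.List.pyGetD_natCast]
        simp [List.getD_eq_getElem?_getD, hne, hki]
    rw [hget]
    push_cast
    by_cases hki : k = (i:Int) <;> (simp [hki]; try ring)

theorem count_pyRange_aux (b i : Int) : ∀ (n : Nat) (a : Int), (b - a).toNat = n →
    ((PySem.List.pyRange a b 1).count i : Int) = if a ≤ i ∧ i < b then 1 else 0 := by
  intro n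
  induction n with
  | zero =>
    intro a ha
    have hba : b ≤ a := by omega
    have : PySem.List.pyRange a b 1 = [] := by
      rw [List.eq_nil_iff_forall_not_mem]
      intro x hx
      rw [PySem.List.mem_pyRange_one] at hx
      omega
    rw [this]
    simp
    omega
  | succ n ih =>
    intro a ha
    have hab : a < b := by omega
    rw [PySem.List.pyRange_one_cons hab, List.count_cons]
    push_cast
    rw [ih (a+1) (by omega)]
    by_cases hai : a = i <;> by_cases h2 : a + 1 ≤ i ∧ i < b <;>
      simp [hai, h2] <;> omega

theorem count_pyRange_one (a b i : Int) :
    ((PySem.List.pyRange a b 1).count i : Int) = if a ≤ i ∧ i < b then 1 else 0 :=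
  count_pyRange_aux b i (b - a).toNat a rfl

theorem length_row_fold (r : List String) (m : Int) : ∀ (n : Nat) (cs : List Int),
    ((PySem.List.pyRange 0 (n : Int) 1).foldl
      (fun cs2 j => if PySem.List.pyGetD r j "" == "*" then
          (PySem.List.pyRange (max 0 (j - 1)) (min m (j + 2)) 1).foldl (fun cs3 k =>
            PySem.List.pySetD cs3 k (PySem.List.pyGetD cs3 k 0 + 1)) cs2
        else cs2) cs).length = cs.length := by
  intro n
  induction n with
  | zero => intro cs; rfl
  | succ n ih =>
    intro cs
    rw [show ((n + 1 : Nat) : Int) = (n : Int) + 1 from by push_cast; ring,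
      PySem.List.pyRange_one_succ_right (by positivity), List.foldl_append]
    simp only [List.foldl_cons, List.foldl_nil]
    split
    · rw [length_bump_fold]; exact ih cs
    · exact ih cs

theorem get_row_fold (r : List String) (m : Int) (i : Nat) : ∀ (n : Nat) (cs : List Int),
    (cs.length : Int) = m →
    PySem.List.pyGetD ((PySem.List.pyRange 0 (n : Int) 1).foldl
      (fun cs2 j => if PySem.List.pyGetD r j "" == "*" then
          (PySem.List.pyRange (max 0 (j - 1)) (min m (j + 2)) 1).foldl (fun cs3 k =>
            PySem.List.pySetD cs3 k (PySem.List.pyGetD cs3 k 0 + 1)) cs2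
        else cs2) cs) (i : Int) 0
    = PySem.List.pyGetD cs (i : Int) 0
      + ((PySem.List.pyRange 0 (n : Int) 1).map (fun j => if (PySem.List.pyGetD r j "" == "*") = true
            ∧ max 0 (j - 1) ≤ (i : Int) ∧ (i : Int) < min m (j + 2)
          then (1 : Int) else 0)).sum := by
  intro n
  induction n with
  | zero => intro cs hm; simp
  | succ n ih =>
    intro cs hm
    rw [show ((n + 1 : Nat) : Int) = (n : Int) + 1 from by push_cast; ring,
      PySem.List.pyRange_one_succ_right (by positivity), List.foldl_append,
      List.map_append, List.sum_append]
    simp only [List.foldl_cons, List.foldl_nil, List.map_cons, List.map_nil,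
      List.sum_cons, List.sum_nil]
    have hlen : (((PySem.List.pyRange 0 (n : Int) 1).foldl
        (fun cs2 j => if PySem.List.pyGetD r j "" == "*" then
            (PySem.List.pyRange (max 0 (j - 1)) (min m (j + 2)) 1).foldl (fun cs3 k =>
              PySem.List.pySetD cs3 k (PySem.List.pyGetD cs3 k 0 + 1)) cs2
          else cs2) cs).length : Int) = m := by
      rw [length_row_fold]; exact hm
    by_cases hmine : (PySem.List.pyGetD r (n : Int) "" == "*") = true
    · rw [if_pos hmine]
      rw [get_bump_fold _ i _ (fun k hk => by
        rw [PySem.List.mem_pyRange_one] at hk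
        constructor <;> omega)]
      rw [ih cs hm, count_pyRange_one]
      simp only [hmine, true_and]
      ring
    · rw [if_neg hmine]
      rw [ih cs hm, if_neg (fun h => hmine h.1)]
      ring

theorem sum_range_window (g : Nat → Int) (L a : Nat) (hg : ∀ j, g j ≠ 0 → a ≤ j ∧ j ≤ a + 2) :
    ((List.range L).map g).sum
      = (if a < L then g a else 0) + (if a + 1 < L then g (a + 1) else 0)
        + (if a + 2 < L then g (a + 2) else 0) := by
  induction L with
  | zero => simp
  | succ L ih =>
    simp only [List.range_succ, List.map_append, List.map_cons, List.map_nil,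
      List.sum_append, List.sum_cons, List.sum_nil]
    rw [ih]
    by_cases h1 : L = a
    · subst h1
      simp [show ¬ L + 1 < L from by omega, show ¬ L + 2 < L from by omega,
        show ¬ L + 2 < L + 1 from by omega]
      try ring
    · by_cases h2 : L = a + 1
      · subst h2
        simp [show a < a + 1 from by omega, show ¬ a + 2 < a + 1 from by omega,
          show a < a + 1 + 1 from by omega, show a + 1 < a + 1 + 1 from by omega]
        try ring
      · by_cases h3 : L = a + 2
        · subst h3
          simp [show a < a + 2 from by omega, show a + 1 < a + 2 from by omega,
            show a < a + 2 + 1 from by omega, show a + 1 < a + 2 + 1 from by omega,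
            show a + 2 < a + 2 + 1 from by omega]
          try ring
        · have hz : g L = 0 := by
            by_contra hc
            have := hg L hc
            omega
          rw [hz]
          have e1 : a < L + 1 ↔ a < L := by omega
          have e2 : a + 1 < L + 1 ↔ a + 1 < L := by omega
          have e3 : a + 2 < L + 1 ↔ a + 2 < L := by omega
          simp only [e1, e2, e3]
          ring

theorem window_term_eq (r : List String) (m : Int) (i : Nat) (him : (i : Int) < m) (t : Nat)
    (h1 : (t : Int) ≤ (i : Int) + 1) (h2 : (i : Int) ≤ (t : Int) + 1) :
    (if t < r.length then
       (if (PySem.List.pyGetD r (t : Int) "" == "*") = true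
            ∧ max 0 ((t : Int) - 1) ≤ (i : Int) ∧ (i : Int) < min m ((t : Int) + 2)
        then (1 : Int) else 0)
     else 0) = pvInd r t := by
  by_cases ht : t < r.length
  · rw [if_pos ht]
    have hw : max 0 ((t : Int) - 1) ≤ (i : Int) ∧ (i : Int) < min m ((t : Int) + 2) := by
      constructor <;> omega
    have hget : PySem.List.pyGetD r (t : Int) "" = r[t] := by
      rw [PySem.List.pyGetD_natCast, List.getD_eq_getElem?_getD, List.getElem?_eq_getElem ht]
      rfl
    unfold pvInd
    rw [List.getElem?_eq_getElem ht]
    by_cases hm : r[t] = "*"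
    · rw [if_pos ⟨by simp [hget, hm], hw⟩, if_pos (by simp [hm])]
    · rw [if_neg (fun hc => hm (by simpa [hget] using hc.1)), if_neg (by simp [hm])]
  · rw [if_neg ht]
    unfold pvInd
    rw [List.getElem?_eq_none (by omega)]
    simp

theorem window_sum_eq_pvCnt (r : List String) (m : Int) (i : Nat) (him : (i : Int) < m) :
    ((PySem.List.pyRange 0 (r.length : Int) 1).map (fun j =>
        if (PySem.List.pyGetD r j "" == "*") = true
            ∧ max 0 (j - 1) ≤ (i : Int) ∧ (i : Int) < min m (j + 2)
          then (1 : Int) else 0)).sum = pvCnt r i := by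
  rw [PySem.List.pyRange_zero_natCast, List.map_map]
  set g : Nat → Int := (fun j =>
        if (PySem.List.pyGetD r j "" == "*") = true
            ∧ max 0 (j - 1) ≤ (i : Int) ∧ (i : Int) < min m (j + 2)
          then (1 : Int) else 0) ∘ (fun k => (k : Int)) with hg
  have hsupp : ∀ j, g j ≠ 0 → (i - 1) ≤ j ∧ j ≤ (i - 1) + 2 := by
    intro j hj
    rw [hg] at hj
    simp only [Function.comp] at hj
    by_cases hc : (PySem.List.pyGetD r (j : Int) "" == "*") = true
        ∧ max 0 ((j : Int) - 1) ≤ (i : Int) ∧ (i : Int) < min m ((j : Int) + 2)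
    · have := hc.2
      constructor <;> omega
    · exact absurd (by rw [if_neg hc]) hj
  rw [sum_range_window g r.length (i - 1) hsupp]
  have hgt : ∀ t : Nat, (if t < r.length then g t else 0)
      = (if t < r.length then
          (if (PySem.List.pyGetD r (t : Int) "" == "*") = true
              ∧ max 0 ((t : Int) - 1) ≤ (i : Int) ∧ (i : Int) < min m ((t : Int) + 2)
            then (1 : Int) else 0)
         else 0) := by intro t; rfl
  cases i with
  | zero =>
    rw [hgt 0, hgt 1, hgt 2]
    rw [window_term_eq r m 0 him 0 (by omega) (by omega),
      window_term_eq r m 0 him 1 (by omega) (by omega)]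
    have h2 : (if 2 < r.length then
        (if (PySem.List.pyGetD r ((2:Nat) : Int) "" == "*") = true
            ∧ max 0 (((2:Nat) : Int) - 1) ≤ ((0:Nat) : Int) ∧ ((0:Nat) : Int) < min m (((2:Nat) : Int) + 2)
          then (1 : Int) else 0)
       else 0) = 0 := by
      split
      · rw [if_neg (fun hc => by have := hc.2.1; push_cast at this; omega)]
      · rfl
    rw [h2]
    unfold pvCnt
    norm_num
  | succ s =>
    rw [hgt, hgt, hgt]
    simp only [Nat.add_sub_cancel]
    rw [window_term_eq r m (s+1) him s (by push_cast; omega) (by push_cast; omega),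
      window_term_eq r m (s+1) him (s+1) (by push_cast; omega) (by push_cast; omega),
      window_term_eq r m (s+1) him (s+2) (by push_cast; omega) (by push_cast; omega)]
    unfold pvCnt
    simp only [Nat.add_sub_cancel, show 1 ≤ s + 1 from by omega, if_true]
    try ring

def pvScatter (ivData : List (List String)) (m : Int) (cs : List Int) (c : Int) : List Int :=
  if 0 ≤ c ∧ c < (ivData.length : Int) then
    (PySem.List.pyRange 0 ((PySem.List.pyGetD ivData c []).length : Int) 1).foldl (fun cs2 j =>
      if PySem.List.pyGetD (PySem.List.pyGetD ivData c []) j "" == "*" then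
        (PySem.List.pyRange (max 0 (j - 1)) (min m (j + 2)) 1).foldl (fun cs3 k =>
          PySem.List.pySetD cs3 k (PySem.List.pyGetD cs3 k 0 + 1)) cs2
      else cs2) cs
  else cs

theorem length_pvScatter (ivData : List (List String)) (m : Int) (cs : List Int) (c : Int) :
    (pvScatter ivData m cs c).length = cs.length := by
  unfold pvScatter
  split
  · exact length_row_fold (PySem.List.pyGetD ivData c []) m (PySem.List.pyGetD ivData c []).length cs
  · rfl

theorem get_pvScatter (ivData : List (List String)) (m : Int) (cs : List Int) (c : Int)
    (hm : (cs.length : Int) = m) (i : Nat) (hi : (i : Int) < m) :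
    PySem.List.pyGetD (pvScatter ivData m cs c) (i : Int) 0
      = PySem.List.pyGetD cs (i : Int) 0 + pvCol ivData c i := by
  unfold pvScatter pvCol
  split
  · rw [get_row_fold (PySem.List.pyGetD ivData c []) m i (PySem.List.pyGetD ivData c []).length cs hm,
      window_sum_eq_pvCnt (PySem.List.pyGetD ivData c []) m i hi]
  · ring

theorem outer3 (ivCol : Int) : PySem.List.pyRange (ivCol - 1) (ivCol + 2) 1 = [ivCol - 1, ivCol, ivCol + 1] := by
  rw [PySem.List.pyRange_one_cons (by omega), PySem.List.pyRange_one_cons (by omega),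
    PySem.List.pyRange_one_cons (by omega)]
  have h0 : PySem.List.pyRange (ivCol - 1 + 1 + 1 + 1) (ivCol + 2) 1 = [] := by
    rw [List.eq_nil_iff_forall_not_mem]
    intro x hx
    rw [PySem.List.mem_pyRange_one] at hx
    omega
  rw [h0]
  have e1 : ivCol - 1 + 1 = ivCol := by ring
  rw [e1]

theorem look_for_mines_spec' (ivCol : Int) (ivData : List (List String)) :
    look_for_mines ivCol ivData = look_for_mines_alt ivCol ivData := by
  have hbody : (fun (s : String) (i : Int) =>
      if PySem.List.pyGetD (PySem.List.pyGetD ivData ivCol []) i "" == "*" then s ++ "*"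
      else s ++ search_directions i ivCol ivData)
    = (fun (s : String) (i : Int) => s ++ (if PySem.List.pyGetD (PySem.List.pyGetD ivData ivCol []) i "" == "*" then "*"
        else search_directions i ivCol ivData)) := by
    funext s i; split_ifs <;> rfl
  have halt : look_for_mines_alt ivCol ivData
      = PySem.Str.join "" (((PySem.List.pyGetD ivData ivCol []).zip
          (pvScatter ivData ((PySem.List.pyGetD ivData ivCol []).length : Int)
            (pvScatter ivData ((PySem.List.pyGetD ivData ivCol []).length : Int)
              (pvScatter ivData ((PySem.List.pyGetD ivData ivCol []).length : Int)
                (List.replicate (PySem.List.pyGetD ivData ivCol []).length 0) (ivCol - 1))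
              ivCol) (ivCol + 1))).map
        (fun p => if p.1 == "*" then "*" else PySem.Int.toStr p.2)) := by
    simp only [look_for_mines_alt, outer3, List.foldl]
    rfl
  rw [halt]
  simp only [look_for_mines]
  rw [hbody, foldl_append_join, String.empty_append]
  apply congrArg
  set row := PySem.List.pyGetD ivData ivCol [] with hrow
  set M := row.length with hM
  set counts := pvScatter ivData (M:Int) (pvScatter ivData (M:Int)
    (pvScatter ivData (M:Int) (List.replicate M 0) (ivCol-1)) ivCol) (ivCol+1) with hcounts
  have hclen : counts.length = M := by
    rw [hcounts, length_pvScatter, length_pvScatter, length_pvScatter, List.length_replicate]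
  rw [PySem.List.pyRange_zero_natCast, List.map_map]
  apply List.ext_getElem
  · simp [hclen, hM]
  · intro i h1 h2
    simp only [List.getElem_map, List.getElem_range, Function.comp, List.getElem_zip]
    have hiM : i < M := by simpa using h1
    have hrowget : PySem.List.pyGetD row ((i:Nat):Int) "" = row[i] := by
      rw [PySem.List.pyGetD_natCast, List.getD_eq_getElem?_getD, List.getElem?_eq_getElem hiM]
      rfl
    by_cases hc : row[i] = "*"
    · simp [hrowget, hc]
    · have hcell : ¬ (PySem.List.pyGetD row ((i:Nat):Int) "" == "*") = true := by
        simp [hrowget, hc]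
      rw [if_neg hcell, if_neg (by simpa using hc)]
      rw [countA_eq ivCol ivData i hcell]
      apply congrArg
      have hicast : ((i:Nat):Int) < (M:Int) := by exact_mod_cast hiM
      have l0 : (((List.replicate M (0:Int)).length : Nat) : Int) = (M:Int) := by simp
      have l1 : (((pvScatter ivData (M:Int) (List.replicate M 0) (ivCol-1)).length : Nat) : Int) = (M:Int) := by
        rw [length_pvScatter]; simp
      have l2 : (((pvScatter ivData (M:Int) (pvScatter ivData (M:Int) (List.replicate M 0) (ivCol-1)) ivCol).length : Nat) : Int) = (M:Int) := by
        rw [length_pvScatter, length_pvScatter]; simp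
      have hget0 : PySem.List.pyGetD (List.replicate M (0:Int)) ((i:Nat):Int) 0 = 0 := by
        rw [PySem.List.pyGetD_natCast, List.getD_eq_getElem?_getD, List.getElem?_replicate]
        split <;> rfl
      have hcget : PySem.List.pyGetD counts ((i:Nat):Int) 0
          = pvCol ivData (ivCol-1) i + pvCol ivData ivCol i + pvCol ivData (ivCol+1) i := by
        rw [hcounts, get_pvScatter _ _ _ _ l2 i hicast, get_pvScatter _ _ _ _ l1 i hicast,
          get_pvScatter _ _ _ _ l0 i hicast, hget0]
        ring
      rw [← hcget, PySem.List.pyGetD_natCast, List.getD_eq_getElem?_getD,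
        List.getElem?_eq_getElem (by rw [hclen]; exact hiM)]
      rfl

-- ===== VERDICT (by name: the statement is the Claim_ definition above) =====
theorem look_for_mines_spec : Claim_equal_look_for_mines := by
  intro ivCol ivData _ _
  exact look_for_mines_spec' ivCol ivData
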